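-- pv_equiv track=rewrite | github.com/KarunKarguz/BunkerMedia | src/bunkermedia/intelligence.py | _pick_entry_url
-- ===== SOURCE A (Python) =====
-- from typing import Any
--
-- def _pick_entry_url(entries: Any) -> str | None:
--     if not isinstance(entries, list):
--         return None
--
--     preferred_ext = ["vtt", "srv3", "json3", "ttml"]
--     for ext in preferred_ext:
--         for item in entries:
--             if not isinstance(item, dict):
--                 continue
--             if str(item.get("ext") or "").lower() == ext and item.get("url"):
--                 return str(item["url"])
--
--     for item in entries:
--         if isinstance(item, dict) and item.get("url"):
--             return str(item["url"])
--
--     return None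
-- ===== SOURCE B (Python) =====
-- def _pick_entry_url(entries):
--     if not isinstance(entries, list):
--         return None
--
--     table = {}
--     first_url = None
--     for item in entries:
--         if not isinstance(item, dict):
--             continue
--         url = item.get("url")
--         if not url:
--             continue
--         if first_url is None:
--             first_url = url
--         ext = str(item.get("ext") or "").lower()
--         if ext not in table:
--             table[ext] = url
--
--     for ext in ["vtt", "srv3", "json3", "ttml"]:
--         if ext in table:
--             return str(table[ext])
--
--     return str(first_url) if first_url else None
-- ===== Notes on version B (the rewrite author's own statement) =====
-- stated objective: alternative
-- what changed: B replaces A's repeated scans of entries (one per preferred extension plus a fallback scan) with a single pass that builds a first-URL-per-lowercased-ext dict and records the first URL overall, then answers by four dict lookups.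
import Mathlib
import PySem

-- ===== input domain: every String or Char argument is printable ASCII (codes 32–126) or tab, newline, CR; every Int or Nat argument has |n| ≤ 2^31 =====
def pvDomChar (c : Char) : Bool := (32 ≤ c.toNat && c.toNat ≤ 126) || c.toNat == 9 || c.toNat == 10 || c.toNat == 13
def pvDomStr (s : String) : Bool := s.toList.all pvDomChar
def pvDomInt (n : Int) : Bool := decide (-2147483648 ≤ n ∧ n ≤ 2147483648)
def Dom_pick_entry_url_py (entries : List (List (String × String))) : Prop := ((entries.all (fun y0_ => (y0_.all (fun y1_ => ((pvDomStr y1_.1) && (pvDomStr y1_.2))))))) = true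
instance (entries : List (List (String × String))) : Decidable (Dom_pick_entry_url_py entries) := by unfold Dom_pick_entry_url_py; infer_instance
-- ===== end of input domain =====

-- B replaces A's four full scans (one per preferred extension) plus a fallback scan with one pass
-- building a first-URL-per-lowercased-ext dict and the first URL overall, then four lookups (objective: alternative).


-- ===== PORT A =====
-- A's inner loop: scan entries for the first item whose lowered 'ext' equals ext and whose 'url' is truthy
def pvAScan (entries : List (List (String × String))) (ext : String) : Option String :=
  entries.findSome? (fun item =>
    if (PySem.Str.lower (((item.lookup "ext").getD "")) == ext) && (((item.lookup "url").getD "") != "") then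
      some ((item.lookup "url").getD "")
    else none)

-- A's second loop: first item with a truthy 'url'
def pvAFallback (entries : List (List (String × String))) : Option String :=
  entries.findSome? (fun item =>
    if ((item.lookup "url").getD "") != "" then some ((item.lookup "url").getD "") else none)

def pick_entry_url_py (entries : List (List (String × String))) : Option String :=
  match ["vtt", "srv3", "json3", "ttml"].findSome? (pvAScan entries) with
  | some u => some u
  | none => pvAFallback entries

-- ===== PORT B =====
-- B's single pass: state = (first-URL-per-lowered-ext table, first truthy URL overall)
def pvBStep (st : PySem.Dict String String × Option String) (item : List (String × String)) :
    PySem.Dict String String × Option String :=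
  let u := (item.lookup "url").getD ""
  if u != "" then
    let fu := if st.2.isNone then some u else st.2
    let e := PySem.Str.lower ((item.lookup "ext").getD "")
    let tbl := if st.1.contains e then st.1 else st.1.insert e u
    (tbl, fu)
  else st

def pick_entry_url_py_alt (entries : List (List (String × String))) : Option String :=
  let st := entries.foldl pvBStep (PySem.Dict.empty, none)
  match ["vtt", "srv3", "json3", "ttml"].findSome? (fun ext => st.1.get? ext) with
  | some u => some u
  | none => st.2

-- ===== PRECONDITION & SPEC =====
def Spec_pick_entry_url_py (entries : List (List (String × String))) (out : Option String) : Prop := out = pick_entry_url_py_alt entries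
instance (entries : List (List (String × String))) (out : Option String) : Decidable (Spec_pick_entry_url_py entries out) := by unfold Spec_pick_entry_url_py; infer_instance

-- ===== CLAIM (what is proved, stated in full; the proofs are below) =====
def Claim_equal_pick_entry_url_py : Prop := ∀ (entries : List (List (String × String))), Dom_pick_entry_url_py entries → Spec_pick_entry_url_py entries (pick_entry_url_py entries)

-- ===== LEMMAS AND PROOFS =====

theorem pvFindSome?_cons_or {α β : Type} (f : α → Option β) (a : α) (l : List α) :
    List.findSome? f (a :: l) = (f a).or (List.findSome? f l) := by
  cases h : f a <;> simp [h]

-- one B-step updates the table exactly by A's per-item test for key ext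
theorem pvStep_fst (st : PySem.Dict String String × Option String) (item : List (String × String)) (ext : String) :
    ((pvBStep st item).1).get? ext
      = (st.1.get? ext).or
          (if (PySem.Str.lower (((item.lookup "ext").getD "")) == ext) && (((item.lookup "url").getD "") != "") then
            some ((item.lookup "url").getD "")
          else none) := by
  unfold pvBStep
  by_cases hu : ((item.lookup "url").getD "") != ""
  · simp only [hu, if_pos, Bool.and_true]
    by_cases he : PySem.Str.lower ((item.lookup "ext").getD "") = ext
    · subst he
      simp only [beq_self_eq_true, if_pos]
      by_cases hc : st.1.contains (PySem.Str.lower ((item.lookup "ext").getD "")) = true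
      · rcases h : st.1.get? (PySem.Str.lower ((item.lookup "ext").getD "")) with _ | v
        · rw [PySem.Dict.contains_eq_isSome_get?, h] at hc; simp at hc
        · simp [hc, h]
      · simp only [Bool.not_eq_true] at hc
        have hn : st.1.get? (PySem.Str.lower ((item.lookup "ext").getD "")) = none := by
          rw [PySem.Dict.contains_eq_isSome_get?] at hc
          rcases h : st.1.get? (PySem.Str.lower ((item.lookup "ext").getD "")) with _ | v
          · rfl
          · rw [h] at hc; simp at hc
        simp [hc, PySem.Dict.get?_insert_self, hn]
    · have hb : (PySem.Str.lower ((item.lookup "ext").getD "") == ext) = false := by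
        simpa using he
      simp only [hb, Bool.false_eq_true, if_false, Option.or_none]
      split
      · rfl
      · exact PySem.Dict.get?_insert_of_ne _ _ (fun h => he h.symm)
  · simp only [Bool.not_eq_true] at hu
    simp [hu]

-- one B-step updates the first-url component exactly by A's fallback test
theorem pvStep_snd (st : PySem.Dict String String × Option String) (item : List (String × String)) :
    (pvBStep st item).2
      = st.2.or (if ((item.lookup "url").getD "") != "" then some ((item.lookup "url").getD "") else none) := by
  unfold pvBStep
  by_cases hu : ((item.lookup "url").getD "") != ""
  · rcases st.2 with _ | x <;> simp [hu]
  · simp only [Bool.not_eq_true] at hu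
    simp [hu]

-- The table component of B's fold answers exactly A's per-ext scan (first match per lowered ext).
theorem pvFold_fst (entries : List (List (String × String)))
    (st : PySem.Dict String String × Option String) (ext : String) :
    ((entries.foldl pvBStep st).1).get? ext = (st.1.get? ext).or (pvAScan entries ext) := by
  induction entries generalizing st with
  | nil => simp [pvAScan]
  | cons item rest ih =>
    rw [List.foldl_cons, ih, pvStep_fst, Option.or_assoc]
    simp only [pvAScan, pvFindSome?_cons_or]

-- The second component of B's fold is the first truthy URL, i.e. A's fallback scan.
theorem pvFold_snd (entries : List (List (String × String)))
    (st : PySem.Dict String String × Option String) :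
    (entries.foldl pvBStep st).2 = st.2.or (pvAFallback entries) := by
  induction entries generalizing st with
  | nil => simp [pvAFallback]
  | cons item rest ih =>
    rw [List.foldl_cons, ih, pvStep_snd, Option.or_assoc]
    simp only [pvAFallback, pvFindSome?_cons_or]

-- ===== VERDICT (by name: the statement is the Claim_ definition above) =====
theorem pick_entry_url_py_spec : Claim_equal_pick_entry_url_py := by
  intro entries _
  unfold Spec_pick_entry_url_py pick_entry_url_py pick_entry_url_py_alt
  have h1 : (fun ext => ((entries.foldl pvBStep (PySem.Dict.empty, none)).1).get? ext)
      = pvAScan entries := by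
    funext ext
    rw [pvFold_fst]
    simp
  have h2 : (entries.foldl pvBStep (PySem.Dict.empty, none)).2 = pvAFallback entries := by
    rw [pvFold_snd]
    simp
  simp only [h1, h2]
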